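-- pv_equiv track=rewrite | github.com/LaiXuanHieu/C-u-Tr-c-D-Li-u | Chuong6/6.14.py | generate_lucky_numbers
-- ===== SOURCE A (Python) =====
-- from collections import deque
--
-- def generate_lucky_numbers(max_length):
--     queue = deque(["6", "8"])
--     lucky_numbers = []
--
--     while queue:
--         number = queue.popleft()
--         if len(number) > max_length:
--             break
--         lucky_numbers.append(int(number))
--         queue.append(number + "6")
--         queue.append(number + "8")
--
--     return sorted(lucky_numbers, reverse=True)  # Sắp xếp giảm dần
-- ===== SOURCE B (Python) =====
-- from itertools import product
--
-- def generate_lucky_numbers(max_length):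
--     result = []
--     length = max_length
--     while length >= 1:
--         for digits in product("86", repeat=length):
--             result.append(int("".join(digits)))
--         length -= 1
--     return result
-- ===== Notes on version B (the rewrite author's own statement) =====
-- stated objective: simpler
-- what changed: Replaced the BFS queue plus final descending sort by a direct enumeration: lengths from max_length down to 1, each length's numbers emitted via the itertools.product('86') digit expansion, which is already in descending order, so no queue and no sort are needed.
import Mathlib
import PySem

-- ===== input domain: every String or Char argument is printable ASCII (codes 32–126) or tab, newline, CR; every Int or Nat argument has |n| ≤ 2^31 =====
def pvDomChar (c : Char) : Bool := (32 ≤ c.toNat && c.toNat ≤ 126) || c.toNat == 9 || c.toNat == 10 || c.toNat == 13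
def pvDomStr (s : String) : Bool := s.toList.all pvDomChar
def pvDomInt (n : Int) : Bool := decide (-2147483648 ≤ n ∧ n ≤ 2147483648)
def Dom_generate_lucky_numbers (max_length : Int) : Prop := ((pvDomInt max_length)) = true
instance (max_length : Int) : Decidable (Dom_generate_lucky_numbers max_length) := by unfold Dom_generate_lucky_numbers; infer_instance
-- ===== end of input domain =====

-- B replaces A's BFS-queue-then-sort by emitting each length from max_length down to 1
-- via the itertools.product('86') digit enumeration, already in descending order (objective: simpler, no sort).

-- ===== PORT A =====
-- digit strings are modelled as List Char; int(number) on a digit string is the standard base-10 fold (exact for digit strings)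
def aVal (s : List Char) : Int := s.foldl (fun a c => 10 * a + ((c.toNat : Int) - 48)) 0

-- the while loop: pop left, break if too long, else collect and enqueue the two children.
-- fuel only makes the recursion structural; it is chosen (below) at least the loop's pop count, so the guard is never reached
def aLoopF (fuel : Nat) (ml : Int) (queue : List (List Char)) (acc : List Int) : List Int :=
  match queue with
  | [] => acc
  | s :: q =>
    if (s.length : Int) > ml then acc
    else match fuel with
      | 0 => acc
      | fuel + 1 => aLoopF fuel ml (q ++ [s ++ ['6'], s ++ ['8']]) (acc ++ [aVal s])

def generate_lucky_numbers (max_length : Int) : List Int :=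
  PySem.List.sorted
    (aLoopF (3 ^ (max_length + 2).toNat + 1) max_length [['6'], ['8']] []) (fun x => x) true

-- ===== PORT B =====
def bJoinInt (s : List Char) : Int := s.foldl (fun a c => 10 * a + ((c.toNat : Int) - 48)) 0

-- itertools.product("86", repeat=n), by the documented recursion result = [x+[y] for x in result for y in pool]
def bProd86 : Nat → List (List Char)
  | 0 => [[]]
  | n + 1 => (bProd86 n).flatMap (fun t => [t ++ ['8'], t ++ ['6']])

-- the while loop: length from max_length down to 1 (i.e. on the Nat max_length.toNat), emitting each length's products
def bLoopNat : Nat → List Int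
  | 0 => []
  | n + 1 => (bProd86 (n + 1)).map bJoinInt ++ bLoopNat n

def generate_lucky_numbers_alt (max_length : Int) : List Int := bLoopNat max_length.toNat

-- ===== PRECONDITION & SPEC =====
def Spec_generate_lucky_numbers (max_length : Int) (out : List Int) : Prop := out = generate_lucky_numbers_alt max_length
instance (max_length : Int) (out : List Int) : Decidable (Spec_generate_lucky_numbers max_length out) := by unfold Spec_generate_lucky_numbers; infer_instance

-- ===== CLAIM (what is proved, stated in full; the proofs are below) =====
def Claim_equal_generate_lucky_numbers : Prop := ∀ (max_length : Int), Dom_generate_lucky_numbers max_length → Spec_generate_lucky_numbers max_length (generate_lucky_numbers max_length)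

-- ===== LEMMAS AND PROOFS =====

-- children of a queue level (the strings enqueued while processing it)
def pvChildren (q : List (List Char)) : List (List Char) :=
  q.flatMap (fun s => [s ++ ['6'], s ++ ['8']])

-- the BFS output, level by level, starting at level L
def pvBfs (ml : Int) (L : Nat) (q : List (List Char)) : List Int :=
  if (L : Int) > ml then [] else q.map aVal ++ pvBfs ml (L + 1) (pvChildren q)
termination_by (ml + 1 - (L : Int)).toNat
decreasing_by omega

-- same, on values only
def pvValsF (vs : List Int) : List Int := vs.flatMap (fun v => [10 * v + 6, 10 * v + 8])

def pvBfsV (ml : Int) (L : Nat) (vs : List Int) : List Int :=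
  if (L : Int) > ml then [] else vs ++ pvBfsV ml (L + 1) (pvValsF vs)
termination_by (ml + 1 - (L : Int)).toNat
decreasing_by omega

-- B's output, rearranged bottom-up: levels ml, ml-1, …, L
def pvBRange (ml : Int) (L : Nat) : List Int :=
  if (L : Int) > ml then [] else pvBRange ml (L + 1) ++ (bProd86 L).map bJoinInt
termination_by (ml + 1 - (L : Int)).toNat
decreasing_by omega

lemma aVal_append (s : List Char) (c : Char) :
    aVal (s ++ [c]) = 10 * aVal s + ((c.toNat : Int) - 48) := by
  simp [aVal, List.foldl_append]

lemma bJoinInt_append (s : List Char) (c : Char) :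
    bJoinInt (s ++ [c]) = 10 * bJoinInt s + ((c.toNat : Int) - 48) := by
  simp [bJoinInt, List.foldl_append]

lemma map_aVal_children (q : List (List Char)) :
    (pvChildren q).map aVal = pvValsF (q.map aVal) := by
  induction q with
  | nil => rfl
  | cons s t ih =>
      simp [pvChildren, pvValsF, List.flatMap_cons, aVal_append] at *
      exact ih

-- fuel never runs out: the loop needs at most this many non-break pops from a given queue
def aNeed (ml : Int) (q : List (List Char)) : Nat :=
  (q.map (fun s => 3 ^ (ml + 2 - (s.length : Int)).toNat)).sum

lemma aLoopF_eq_bfs (ml : Int) :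
    ∀ (n L : Nat) (rest kids : List (List Char)) (acc : List Int) (fuel : Nat),
      (ml + 1 - (L : Int)).toNat ≤ n →
      aNeed ml (rest ++ kids) ≤ fuel →
      (∀ s ∈ rest, s.length = L) → (∀ s ∈ kids, s.length = L + 1) →
      aLoopF fuel ml (rest ++ kids) acc =
        acc ++ (if (L : Int) > ml then []
                else rest.map aVal ++ pvBfs ml (L + 1) (kids ++ pvChildren rest)) := by
  intro n
  induction n with
  | zero =>
      intro L rest kids acc fuel hn hfuel hr hk
      have hgt : (L : Int) > ml := by omega
      rw [if_pos hgt]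
      cases rest with
      | cons s rs =>
          have : (s.length : Int) > ml := by rw [hr s (by simp)]; exact hgt
          cases fuel <;> simp [aLoopF, this]
      | nil =>
          cases kids with
          | nil => simp [aLoopF]
          | cons k ks =>
              have : (k.length : Int) > ml := by
                rw [hk k (by simp)]; push_cast; omega
              cases fuel <;> simp [aLoopF, this]
  | succ n ih =>
      intro L rest kids acc fuel hn hfuel hr hk
      induction rest generalizing kids acc fuel with
      | nil =>
          by_cases hgt : (L : Int) > ml
          · rw [if_pos hgt]
            cases kids with
            | nil => simp [aLoopF]
            | cons k ks =>
                have : (k.length : Int) > ml := by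
                  rw [hk k (by simp)]; push_cast; omega
                cases fuel <;> simp [aLoopF, this]
          · rw [if_neg hgt]
            have h2 := ih (L + 1) kids [] acc fuel (by push_cast; omega)
              (by simpa using hfuel) hk (by simp)
            simp only [List.append_nil, List.nil_append, List.map_nil] at h2 ⊢
            have hc : pvChildren ([] : List (List Char)) = [] := rfl
            rw [hc, List.append_nil, h2]
            congr 1
            conv_rhs => rw [pvBfs]
      | cons s rs ihr =>
          have hs : s.length = L := hr s (by simp)
          by_cases hgt : (L : Int) > ml
          · have : (s.length : Int) > ml := by rw [hs]; exact hgt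
            cases fuel <;> simp [aLoopF, this, hgt]
          · have hslen : ¬ ((s.length : Int) > ml) := by rw [hs]; exact hgt
            -- fuel is positive and stays sufficient: the popped string's 3^e weight covers
            -- its two children's weights plus this step
            have he : (ml + 2 - ((s.length : Int) + 1)).toNat + 1
                = (ml + 2 - (s.length : Int)).toNat := by
              rw [hs]; omega
            have hone : 1 ≤ 3 ^ (ml + 2 - ((s.length : Int) + 1)).toNat :=
              Nat.one_le_pow _ 3 (by norm_num)
            have h3 : 3 ^ (ml + 2 - (s.length : Int)).toNat
                = 3 * 3 ^ (ml + 2 - ((s.length : Int) + 1)).toNat := by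
              rw [← he, pow_succ, Nat.mul_comm]
            have hneed : aNeed ml ((s :: rs) ++ kids)
                = 3 ^ (ml + 2 - (s.length : Int)).toNat + aNeed ml (rs ++ kids) := by
              simp [aNeed]
            have len6 : (((s ++ ['6']).length : Nat) : Int) = (s.length : Int) + 1 := by simp
            have len8 : (((s ++ ['8']).length : Nat) : Int) = (s.length : Int) + 1 := by simp
            have hneed' : aNeed ml (rs ++ (kids ++ [s ++ ['6'], s ++ ['8']]))
                = aNeed ml (rs ++ kids)
                  + 2 * 3 ^ (ml + 2 - ((s.length : Int) + 1)).toNat := by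
              simp only [aNeed, List.map_append, List.sum_append, List.map_cons,
                List.map_nil, List.sum_cons, List.sum_nil, len6, len8]
              ring
            obtain ⟨f, rfl⟩ : ∃ f, fuel = f + 1 := by
              refine ⟨fuel - 1, ?_⟩
              rw [hneed] at hfuel
              omega
            have step : aLoopF (f + 1) ml ((s :: rs) ++ kids) acc
                = aLoopF f ml (rs ++ (kids ++ [s ++ ['6'], s ++ ['8']])) (acc ++ [aVal s]) := by
              simp [aLoopF, hslen]
            rw [step]
            have hf' : aNeed ml (rs ++ (kids ++ [s ++ ['6'], s ++ ['8']])) ≤ f := by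
              rw [hneed'] ; rw [hneed] at hfuel; omega
            have hk' : ∀ t ∈ kids ++ [s ++ ['6'], s ++ ['8']], t.length = L + 1 := by
              intro t ht
              rcases List.mem_append.mp ht with h | h
              · exact hk t h
              · simp at h
                rcases h with h | h <;> · subst h; simp [hs]
            rw [ihr (kids ++ [s ++ ['6'], s ++ ['8']]) (acc ++ [aVal s]) f hf'
              (fun t ht => hr t (by simp [ht])) hk']
            rw [if_neg hgt, if_neg hgt]
            simp [pvChildren, List.flatMap_cons, List.append_assoc]

lemma bfs_eq_bfsV (ml : Int) :
    ∀ (n L : Nat) (q : List (List Char)), (ml + 1 - (L : Int)).toNat ≤ n →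
      pvBfs ml L q = pvBfsV ml L (q.map aVal) := by
  intro n
  induction n with
  | zero =>
      intro L q hn
      have hgt : (L : Int) > ml := by omega
      have h1 : pvBfs ml L q = [] := by rw [pvBfs, if_pos hgt]
      have h2 : pvBfsV ml L (q.map aVal) = [] := by rw [pvBfsV, if_pos hgt]
      rw [h1, h2]
  | succ n ih =>
      intro L q hn
      by_cases hgt : (L : Int) > ml
      · have h1 : pvBfs ml L q = [] := by rw [pvBfs, if_pos hgt]
        have h2 : pvBfsV ml L (q.map aVal) = [] := by rw [pvBfsV, if_pos hgt]
        rw [h1, h2]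
      · rw [pvBfs, pvBfsV, if_neg hgt, if_neg hgt]
        rw [ih (L + 1) (pvChildren q) (by push_cast; omega), map_aVal_children]

-- B's level values, with the last digit split off
lemma map_bProd86_succ (n : Nat) :
    (bProd86 (n + 1)).map bJoinInt
      = ((bProd86 n).map bJoinInt).flatMap (fun v => [10 * v + 8, 10 * v + 6]) := by
  simp only [bProd86, List.map_flatMap, List.flatMap_map]
  congr 1
  funext t
  simp [bJoinInt_append]

lemma rev_valsF (vs : List Int) :
    (pvValsF vs).reverse = vs.reverse.flatMap (fun v => [10 * v + 8, 10 * v + 6]) := by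
  simp [pvValsF, List.reverse_flatMap, Function.comp_def]

lemma bfsV_reverse (ml : Int) :
    ∀ (n L : Nat) (vs : List Int), (ml + 1 - (L : Int)).toNat ≤ n →
      vs.reverse = (bProd86 L).map bJoinInt →
      (pvBfsV ml L vs).reverse = pvBRange ml L := by
  intro n
  induction n with
  | zero =>
      intro L vs hn hrev
      have hgt : (L : Int) > ml := by omega
      have h1 : pvBfsV ml L vs = [] := by rw [pvBfsV, if_pos hgt]
      have h2 : pvBRange ml L = [] := by rw [pvBRange, if_pos hgt]
      rw [h1, h2]
      rfl
  | succ n ih =>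
      intro L vs hn hrev
      by_cases hgt : (L : Int) > ml
      · have h1 : pvBfsV ml L vs = [] := by rw [pvBfsV, if_pos hgt]
        have h2 : pvBRange ml L = [] := by rw [pvBRange, if_pos hgt]
        rw [h1, h2]
        rfl
      · rw [pvBfsV, pvBRange, if_neg hgt, if_neg hgt]
        rw [List.reverse_append, hrev,
          ih (L + 1) (pvValsF vs) (by push_cast; omega)
            (by rw [rev_valsF, hrev, map_bProd86_succ])]

lemma bRange_swap (ml : Int) :
    ∀ (n L : Nat), (ml + 1 - (L : Int)).toNat ≤ n → (L : Int) ≤ ml →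
      pvBRange ml L = (bProd86 ml.toNat).map bJoinInt ++ pvBRange (ml - 1) L := by
  intro n
  induction n with
  | zero => intro L hn hL; omega
  | succ n ih =>
      intro L hn hL
      rw [pvBRange, if_neg (by omega)]
      by_cases heq : (L : Int) = ml
      · have h1 : pvBRange ml (L + 1) = [] := by rw [pvBRange, if_pos (by push_cast; omega)]
        have h2 : pvBRange (ml - 1) L = [] := by rw [pvBRange, if_pos (by omega)]
        have h3 : ml.toNat = L := by omega
        rw [h1, h2, h3]
        simp
      · have hlt : (L : Int) < ml := lt_of_le_of_ne hL heq
        rw [ih (L + 1) (by push_cast; omega) (by push_cast; omega)]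
        rw [List.append_assoc]
        congr 1
        conv_rhs => rw [pvBRange]
        rw [if_neg (show ¬ (L : Int) > ml - 1 by omega)]

lemma bLoopNat_eq_bRange :
    ∀ (n : Nat) (ml : Int), ml.toNat ≤ n → bLoopNat ml.toNat = pvBRange ml 1 := by
  intro n
  induction n with
  | zero =>
      intro ml hn
      have h0 : ml.toNat = 0 := by omega
      rw [h0, pvBRange, if_pos (by omega)]
      rfl
  | succ n ih =>
      intro ml hn
      by_cases h1 : ml ≥ 1
      · obtain ⟨k, hk⟩ : ∃ k, ml.toNat = k + 1 := ⟨ml.toNat - 1, by omega⟩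
        have hk' : (ml - 1).toNat = k := by omega
        rw [bRange_swap ml (ml + 1 - 1).toNat 1 (by omega) (by omega),
          ← ih (ml - 1) (by omega), hk, hk']
        rfl
      · have h0 : ml.toNat = 0 := by omega
        rw [h0, pvBRange, if_pos (by omega)]
        rfl

-- every element of the BFS value list is above any lower bound of the current level
lemma bfsV_lt_of_lt (ml : Int) :
    ∀ (n L : Nat) (vs : List Int) (a : Int), (ml + 1 - (L : Int)).toNat ≤ n →
      0 ≤ a → (∀ v ∈ vs, a < v) → ∀ w ∈ pvBfsV ml L vs, a < w := by
  intro n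
  induction n with
  | zero =>
      intro L vs a hn ha hvs w hw
      rw [pvBfsV, if_pos (by omega)] at hw
      simp at hw
  | succ n ih =>
      intro L vs a hn ha hvs w hw
      by_cases hgt : (L : Int) > ml
      · rw [pvBfsV, if_pos hgt] at hw; simp at hw
      · rw [pvBfsV, if_neg hgt] at hw
        rcases List.mem_append.mp hw with h | h
        · exact hvs w h
        · refine ih (L + 1) (pvValsF vs) a (by push_cast; omega) ha ?_ w h
          intro v hv
          simp only [pvValsF, List.mem_flatMap] at hv
          obtain ⟨u, hu, hv⟩ := hv
          have := hvs u hu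
          simp at hv
          rcases hv with hv | hv <;> omega

lemma valsF_pairwise (vs : List Int) (hpos : ∀ v ∈ vs, 0 < v)
    (hpw : vs.Pairwise (· < ·)) : (pvValsF vs).Pairwise (· < ·) := by
  induction vs with
  | nil => simp [pvValsF]
  | cons v t ih =>
      rw [List.pairwise_cons] at hpw
      simp only [pvValsF, List.flatMap_cons]
      rw [List.pairwise_append]
      refine ⟨by simp, ih (fun u hu => hpos u (by simp [hu])) hpw.2, ?_⟩
      intro x hx y hy
      simp only [List.mem_flatMap] at hy
      obtain ⟨u, hu, hy⟩ := hy
      have hvu := hpw.1 u hu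
      simp at hx hy
      rcases hx with hx | hx <;> rcases hy with hy | hy <;> omega

lemma bfsV_pairwise (ml : Int) :
    ∀ (n L : Nat) (vs : List Int) (lo : Int), (ml + 1 - (L : Int)).toNat ≤ n →
      0 < lo → (∀ v ∈ vs, lo ≤ v ∧ v < 10 * lo) → vs.Pairwise (· < ·) →
      (pvBfsV ml L vs).Pairwise (· < ·) := by
  intro n
  induction n with
  | zero =>
      intro L vs lo hn _ _ _
      rw [pvBfsV, if_pos (by omega)]
      simp
  | succ n ih =>
      intro L vs lo hn hlo hbd hpw
      by_cases hgt : (L : Int) > ml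
      · rw [pvBfsV, if_pos hgt]; simp
      · rw [pvBfsV, if_neg hgt]
        rw [List.pairwise_append]
        have hbd' : ∀ v ∈ pvValsF vs, 10 * lo + 6 ≤ v ∧ v < 10 * (10 * lo + 6) := by
          intro v hv
          simp only [pvValsF, List.mem_flatMap] at hv
          obtain ⟨u, hu, hv⟩ := hv
          have := hbd u hu
          simp at hv
          rcases hv with hv | hv <;> omega
        refine ⟨hpw, ih (L + 1) (pvValsF vs) (10 * lo + 6) (by push_cast; omega) (by omega)
          hbd' (valsF_pairwise vs (fun v hv => by have := hbd v hv; omega) hpw), ?_⟩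
        intro a ha w hw
        refine bfsV_lt_of_lt ml ((ml + 1 - ((L : Int) + 1)).toNat) (L + 1) (pvValsF vs) a
          (by push_cast; omega) (by have := hbd a ha; omega) ?_ w hw
        intro v hv
        have h1 := hbd' v hv
        have h2 := hbd a ha
        omega

-- the two closed forms agree at the start
lemma aNeed_init_le (ml : Int) : aNeed ml [['6'], ['8']] ≤ 3 ^ (ml + 2).toNat + 1 := by
  have h1 : aNeed ml [['6'], ['8']] = 2 * 3 ^ (ml + 1).toNat := by
    have e : (ml + 2 - (((['6'] : List Char).length : Nat) : Int)).toNat = (ml + 1).toNat := by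
      simp only [List.length_cons, List.length_nil]
      omega
    show 3 ^ (ml + 2 - (((['6'] : List Char).length : Nat) : Int)).toNat
        + (3 ^ (ml + 2 - (((['8'] : List Char).length : Nat) : Int)).toNat + 0)
        = 2 * 3 ^ (ml + 1).toNat
    rw [show ((((['8'] : List Char).length : Nat)) : Int)
        = (((['6'] : List Char).length : Nat) : Int) from rfl, e]
    ring
  rw [h1]
  by_cases hml : -1 ≤ ml
  · have hb : (ml + 2).toNat = (ml + 1).toNat + 1 := by omega
    rw [hb, pow_succ]
    nlinarith [Nat.one_le_pow (ml + 1).toNat 3 (by norm_num : 0 < 3)]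
  · have he : (ml + 1).toNat = 0 := by omega
    have hb : (ml + 2).toNat = 0 := by omega
    rw [he, hb]
    norm_num

lemma aList_closed (ml : Int) :
    aLoopF (3 ^ (ml + 2).toNat + 1) ml [['6'], ['8']] [] = pvBfsV ml 1 [6, 8] := by
  have h := aLoopF_eq_bfs ml (ml + 1 - 1).toNat 1 [['6'], ['8']] [] []
    (3 ^ (ml + 2).toNat + 1) (by omega) (by simpa using aNeed_init_le ml)
    (by intro s hs; simp at hs; rcases hs with h | h <;> simp [h])
    (by simp)
  simp only [List.append_nil, List.nil_append, Nat.cast_one] at h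
  have hmap : ([['6'], ['8']] : List (List Char)).map aVal = [6, 8] := by decide
  have hch : (pvChildren [['6'], ['8']]).map aVal = pvValsF [6, 8] := by
    rw [map_aVal_children, hmap]
  rw [h, pvBfsV]
  simp only [Nat.cast_one]
  by_cases hgt : (1 : Int) > ml
  · rw [if_pos hgt, if_pos hgt]
  · rw [if_neg hgt, if_neg hgt]
    rw [bfs_eq_bfsV ml (ml + 1 - 2).toNat (1 + 1) _ (by push_cast; omega), hch, hmap]

lemma alt_closed (ml : Int) :
    generate_lucky_numbers_alt ml = (pvBfsV ml 1 [6, 8]).reverse := by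
  show bLoopNat ml.toNat = _
  rw [bLoopNat_eq_bRange ml.toNat ml (le_refl _)]
  rw [← bfsV_reverse ml (ml + 1 - 1).toNat 1 [6, 8] (by omega) (by decide)]

lemma aList_pairwise (ml : Int) : (pvBfsV ml 1 [6, 8]).Pairwise (· < ·) := by
  refine bfsV_pairwise ml (ml + 1 - 1).toNat 1 [6, 8] 6 (by omega) (by norm_num) ?_ ?_
  · intro v hv; simp at hv; rcases hv with h | h <;> omega
  · simp

-- ===== VERDICT (by name: the statement is the Claim_ definition above) =====
theorem generate_lucky_numbers_spec : Claim_equal_generate_lucky_numbers := by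
  intro ml _
  show generate_lucky_numbers ml = generate_lucky_numbers_alt ml
  rw [generate_lucky_numbers, aList_closed, alt_closed]
  refine PySem.List.sorted_rev_eq_of_perm_of_pairwise_gt _ _ _ (List.reverse_perm _) ?_
  rw [List.pairwise_reverse]
  exact aList_pairwise ml
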